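-- pv_equiv track=rewrite | github.com/MGhayaz/MosahAI | mosahai/media_intelligence/image_pipeline/article_image_extractor.py | _select_srcset_url
-- ===== SOURCE A (Python) =====
-- def _select_srcset_url(srcset: str) -> tuple[str | None, int | None]:
--     entries = [item.strip() for item in str(srcset or "").split(",") if item.strip()]
--     if not entries:
--         return None, None
--     parsed: list[tuple[int, str]] = []
--     for entry in entries:
--         parts = entry.split()
--         if not parts:
--             continue
--         url = parts[0]
--         width = 0
--         if len(parts) > 1 and parts[1].endswith("w"):
--             try:
--                 width = int(parts[1][:-1])
--             except Exception:
--                 width = 0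
--         parsed.append((width, url))
--     if not parsed:
--         return None, None
--     parsed.sort(key=lambda item: item[0], reverse=True)
--     return parsed[0][1], parsed[0][0] or None
-- ===== SOURCE B (Python) =====
-- def _select_srcset_url(srcset):
--     best_url = None
--     best_width = 0
--     for item in str(srcset or "").split(","):
--         entry = item.strip()
--         if not entry:
--             continue
--         parts = entry.split()
--         url = parts[0]
--         width = 0
--         if len(parts) > 1 and parts[1].endswith("w"):
--             try:
--                 width = int(parts[1][:-1])
--             except ValueError:
--                 width = 0
--         if best_url is None or width > best_width:
--             best_url, best_width = url, width
--     if best_url is None: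
--         return None, None
--     return best_url, best_width or None
-- ===== Notes on version B (the rewrite author's own statement) =====
-- stated objective: simpler
-- what changed: Replaces building a full parsed list and stable reverse-sorting it (taking the head) by a single pass that keeps a running best (url,width), updating on strictly greater width so the first maximum wins.
import Mathlib
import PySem

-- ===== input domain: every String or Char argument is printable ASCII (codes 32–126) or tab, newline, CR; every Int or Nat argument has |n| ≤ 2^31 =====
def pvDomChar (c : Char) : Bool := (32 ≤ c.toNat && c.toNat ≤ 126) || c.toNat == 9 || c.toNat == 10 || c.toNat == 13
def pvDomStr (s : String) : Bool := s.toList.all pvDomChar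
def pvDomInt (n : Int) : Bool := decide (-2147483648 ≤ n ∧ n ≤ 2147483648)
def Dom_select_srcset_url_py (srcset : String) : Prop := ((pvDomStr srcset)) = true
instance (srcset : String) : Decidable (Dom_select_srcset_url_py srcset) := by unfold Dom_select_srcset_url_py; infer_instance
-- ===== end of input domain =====

-- B replaces A's build-list + stable reverse-sort + take-head by a single running-best pass
-- (strict '>' update, so the first occurrence of the maximal width wins); simpler, same results.


-- ===== PORT A =====
-- width of one entry's second token: int(parts[1][:-1]) if it ends with "w", else/on ValueError 0
def pvWidthOf (rest : List String) : Int :=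
  match rest with
  | [] => 0
  | w1 :: _ =>
    if PySem.Str.endswith w1 "w" then
      match PySem.Int.ofStr? (PySem.Str.slice w1 none (some (-1))) with
      | some n => n
      | none => 0
    else 0

def select_srcset_url_py (srcset : String) : Option String × Option Int :=
  -- str(srcset or "") is srcset itself for a str argument
  let entries := (((PySem.Str.split? srcset ",").getD []).map PySem.Str.strip).filter
    (fun it => PySem.Str.len it ≠ 0)
  if entries = [] then (none, none)
  else
    let parsed : List (Int × String) := entries.foldl (fun parsed entry =>
      match PySem.Str.split₀ entry with
      | [] => parsed
      | url :: rest => parsed ++ [(pvWidthOf rest, url)]) []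
    if parsed = [] then (none, none)
    else
      match PySem.List.sorted parsed (fun item => item.1) true with
      | [] => (none, none)
      | (w, u) :: _ => (some u, if w = 0 then none else some w)

-- ===== PORT B =====
def select_srcset_url_py_alt (srcset : String) : Option String × Option Int :=
  let st := ((PySem.Str.split? srcset ",").getD []).foldl
    (fun (st : Option String × Int) item =>
      let entry := PySem.Str.strip item
      if PySem.Str.len entry = 0 then st
      else
        match PySem.Str.split₀ entry with
        | [] => st  -- unreachable: entry is non-empty after strip, so split() is non-empty
        | url :: rest =>
          let width := pvWidthOf rest
          if st.1 = none ∨ width > st.2 then (some url, width) else st)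
    (none, 0)
  match st with
  | (none, _) => (none, none)
  | (some u, w) => (some u, if w = 0 then none else some w)

-- ===== PRECONDITION & SPEC =====
def Spec_select_srcset_url_py (srcset : String) (out : Option String × Option Int) : Prop := out = select_srcset_url_py_alt srcset
instance (srcset : String) (out : Option String × Option Int) : Decidable (Spec_select_srcset_url_py srcset out) := by unfold Spec_select_srcset_url_py; infer_instance

-- ===== CLAIM (what is proved, stated in full; the proofs are below) =====
def Claim_equal_select_srcset_url_py : Prop := ∀ (srcset : String), Dom_select_srcset_url_py srcset → Spec_select_srcset_url_py srcset (select_srcset_url_py srcset)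

-- ===== LEMMAS AND PROOFS =====

-- what one comma-piece contributes: none if its strip is empty (or split() is), else (width, url)
def pvItemParse (item : String) : Option (Int × String) :=
  let entry := PySem.Str.strip item
  if PySem.Str.len entry = 0 then none
  else
    match PySem.Str.split₀ entry with
    | [] => none
    | url :: rest => some (pvWidthOf rest, url)

-- B's state update, abstracted over the parsed contribution
def pvGStep (st : Option String × Int) (o : Option (Int × String)) : Option String × Int :=
  match o with
  | none => st
  | some p => if st.1 = none ∨ p.1 > st.2 then (some p.2, p.1) else st

-- the first-maximum fold that the head of A's stable reverse sort computes
def pvMaxStep (m : Option (Int × String)) (p : Int × String) : Option (Int × String) :=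
  match m with
  | none => some p
  | some q => if q.1 < p.1 then some p else some q

def pvFirstMax (ps : List (Int × String)) : Option (Int × String) := ps.foldl pvMaxStep none

-- relation between B's running state and the first-max over A's parsed pairs
def pvRel (st : Option String × Int) (m : Option (Int × String)) : Prop :=
  match m with
  | none => st.1 = none
  | some q => st.1 = some q.2 ∧ st.2 = q.1

theorem pvHead_insertBy (x : Int × String) (ys : List (Int × String)) :
    (PySem.List.insertBy (fun a b => decide (b.1 < a.1)) x ys).head? =
      pvMaxStep ys.head? x := by
  cases ys with
  | nil => rfl
  | cons y t =>
    simp only [PySem.List.insertBy, List.head?_cons, pvMaxStep]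
    by_cases h : y.1 < x.1 <;> simp [h]

theorem pvHead_foldl_insertBy (xs : List (Int × String)) (acc : List (Int × String)) :
    (xs.foldl (fun a x => PySem.List.insertBy (fun a b => decide (b.1 < a.1)) x a) acc).head? =
      xs.foldl pvMaxStep acc.head? := by
  induction xs generalizing acc with
  | nil => rfl
  | cons x t ih =>
    simp only [List.foldl_cons]
    rw [ih, pvHead_insertBy]

theorem pvHead_sorted_rev (ps : List (Int × String)) :
    (PySem.List.sorted ps (fun item => item.1) true).head? = pvFirstMax ps := by
  rw [PySem.List.sorted_rev_eq_foldl_insertBy, pvFirstMax, pvHead_foldl_insertBy]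
  rfl

theorem pvFirstMax_some (ps : List (Int × String)) (p : Int × String) :
    ∃ q, ps.foldl pvMaxStep (some p) = some q := by
  induction ps generalizing p with
  | nil => exact ⟨p, rfl⟩
  | cons x t ih =>
    simp only [List.foldl_cons, pvMaxStep]
    by_cases h : p.1 < x.1
    · simpa [h] using ih x
    · simpa [h] using ih p

-- A's parsed-list fold is a flatMap (each entry contributes zero or one pair)
theorem pvParsed_eq_flatMap (es : List String) :
    (es.foldl (fun parsed entry =>
      match PySem.Str.split₀ entry with
      | [] => parsed
      | url :: rest => parsed ++ [(pvWidthOf rest, url)]) []) =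
    es.flatMap (fun entry =>
      match PySem.Str.split₀ entry with
      | [] => []
      | url :: rest => [(pvWidthOf rest, url)]) := by
  have h : ∀ (es : List String) (acc : List (Int × String)),
      (es.foldl (fun parsed entry =>
        match PySem.Str.split₀ entry with
        | [] => parsed
        | url :: rest => parsed ++ [(pvWidthOf rest, url)]) acc) =
      acc ++ es.flatMap (fun entry =>
        match PySem.Str.split₀ entry with
        | [] => []
        | url :: rest => [(pvWidthOf rest, url)]) := by
    intro es
    induction es with
    | nil => simp
    | cons e t ih =>
      intro acc
      simp only [List.foldl_cons, List.flatMap_cons]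
      cases hs : PySem.Str.split₀ e with
      | nil => simp [ih]
      | cons u r => simp [ih]
  simpa using h es []

-- A's strip-filter-parse pipeline contributes exactly the per-item parses
theorem pvPipe (items : List String) :
    ((items.map PySem.Str.strip).filter (fun it => PySem.Str.len it ≠ 0)).flatMap
      (fun entry =>
        match PySem.Str.split₀ entry with
        | [] => []
        | url :: rest => [(pvWidthOf rest, url)]) =
    (items.map pvItemParse).flatMap Option.toList := by
  induction items with
  | nil => rfl
  | cons e t ih =>
    simp only [List.map_cons, List.filter_cons]
    by_cases he : PySem.Str.len (PySem.Str.strip e) = 0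
    · rw [if_neg (by simpa using he)]
      have he' : PySem.Chars.strip e.toList = [] := by simpa using he
      simp at ih
      simp [pvItemParse, he', ih]
    · rw [if_pos (by simpa using he)]
      have he' : ¬ PySem.Chars.strip e.toList = [] := by simpa using he
      simp at ih
      cases hs : PySem.Str.split₀ (PySem.Str.strip e) with
      | nil => simp [pvItemParse, he', hs, ih]
      | cons url rest => simp [pvItemParse, he', hs, ih]

-- B's literal loop body is pvGStep applied to the item's parse
theorem pvStep (st : Option String × Int) (item : String) :
    (let entry := PySem.Str.strip item
     if PySem.Str.len entry = 0 then st
     else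
       match PySem.Str.split₀ entry with
       | [] => st
       | url :: rest =>
         let width := pvWidthOf rest
         if st.1 = none ∨ width > st.2 then (some url, width) else st) =
    pvGStep st (pvItemParse item) := by
  unfold pvGStep pvItemParse
  by_cases he : PySem.Chars.strip item.toList = []
  · simp [he]
  · cases hs : PySem.Str.split₀ (PySem.Str.strip item) <;> simp [he, hs]

set_option maxHeartbeats 2000000 in
theorem pvBfold (items : List String) (st0 : Option String × Int) :
    (items.foldl (fun (st : Option String × Int) item =>
       let entry := PySem.Str.strip item
       if PySem.Str.len entry = 0 then st
       else
         match PySem.Str.split₀ entry with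
         | [] => st
         | url :: rest =>
           let width := pvWidthOf rest
           if st.1 = none ∨ width > st.2 then (some url, width) else st) st0) =
    (items.map pvItemParse).foldl pvGStep st0 := by
  have hf : (fun (st : Option String × Int) item =>
      let entry := PySem.Str.strip item
      if PySem.Str.len entry = 0 then st
      else
        match PySem.Str.split₀ entry with
        | [] => st
        | url :: rest =>
          let width := pvWidthOf rest
          if st.1 = none ∨ width > st.2 then (some url, width) else st) =
      fun (st : Option String × Int) item => pvGStep st (pvItemParse item) := by
    funext st item
    exact pvStep st item
  rw [hf, List.foldl_map]

-- the running best tracks the first maximum of the contributed pairs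
theorem pvGen (os : List (Option (Int × String))) (st : Option String × Int)
    (m : Option (Int × String)) (hrel : pvRel st m) :
    pvRel (os.foldl pvGStep st) ((os.flatMap Option.toList).foldl pvMaxStep m) := by
  induction os generalizing st m with
  | nil => exact hrel
  | cons o t ih =>
    cases o with
    | none => exact ih st m hrel
    | some p =>
      simp only [List.foldl_cons, List.flatMap_cons, Option.toList_some,
        List.singleton_append]
      apply ih
      cases m with
      | none =>
        have h1 : st.1 = none := hrel
        simp [pvGStep, pvMaxStep, pvRel, h1]
      | some q =>
        obtain ⟨h1, h2⟩ := hrel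
        by_cases hlt : q.1 < p.1
        · have hc : st.1 = none ∨ p.1 > st.2 := Or.inr (by omega)
          simp [pvGStep, pvMaxStep, pvRel, hc, hlt]
        · have hc : ¬ (st.1 = none ∨ p.1 > st.2) := by
            simp only [h1, h2]
            intro hor
            rcases hor with hn | hgt
            · exact absurd hn (by simp)
            · omega
          simp [pvGStep, pvMaxStep, pvRel, hlt, h1, h2]

-- ===== VERDICT (by name: the statement is the Claim_ definition above) =====
set_option maxHeartbeats 2000000 in
theorem select_srcset_url_py_spec : Claim_equal_select_srcset_url_py := by
  intro srcset _
  unfold Spec_select_srcset_url_py select_srcset_url_py select_srcset_url_py_alt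
  simp only [pvParsed_eq_flatMap, pvPipe, pvBfold]
  set items := (PySem.Str.split? srcset ",").getD [] with hitems
  set entries := (items.map PySem.Str.strip).filter (fun it => PySem.Str.len it ≠ 0) with hentries
  set M := items.map pvItemParse with hM
  set P := M.flatMap Option.toList with hP
  set stB := M.foldl pvGStep (none, 0) with hstB
  have hfm : pvRel stB (pvFirstMax P) := pvGen M (none, 0) none rfl
  have hhead : (PySem.List.sorted P (fun item => item.1) true).head? = pvFirstMax P :=
    pvHead_sorted_rev P
  by_cases hp : P = []
  · have hfmn : pvFirstMax P = none := by rw [hp]; rfl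
    rw [hfmn] at hfm
    have hB : (match stB with
        | (none, _) => ((none : Option String), (none : Option Int))
        | (some u, w) => (some u, if w = 0 then none else some w)) = (none, none) := by
      obtain ⟨u?, w⟩ := stB
      cases u? with
      | none => rfl
      | some u => exact absurd hfm (by simp [pvRel])
    rw [hB]
    by_cases he : entries = []
    · rw [if_pos he]
    · rw [if_neg he, if_pos hp]
  · have hfs : ∃ q, pvFirstMax P = some q := by
      obtain ⟨p, t, hpt⟩ := List.exists_cons_of_ne_nil hp
      rw [pvFirstMax, hpt, List.foldl_cons]
      exact pvFirstMax_some t p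
    obtain ⟨q, hq⟩ := hfs
    rw [hq] at hfm
    obtain ⟨h1, h2⟩ := hfm
    have he : entries ≠ [] := by
      intro h
      apply hp
      rw [hP, hM, ← pvPipe, ← hentries, h]
      rfl
    rw [if_neg he, if_neg hp]
    rw [hq] at hhead
    cases hsort : PySem.List.sorted P (fun item => item.1) true with
    | nil => rw [hsort] at hhead; simp at hhead
    | cons h t =>
      rw [hsort] at hhead
      simp only [List.head?_cons, Option.some.injEq] at hhead
      obtain ⟨u?, w⟩ := stB
      simp only at h1 h2
      subst h1 h2
      obtain ⟨hw, hu⟩ := h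
      subst hhead
      simp
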